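-- pv_equiv track=rewrite | github.com/lancalc/lancalc | lancalc/core.py | is_special_range
-- ===== SOURCE A (Python) =====
-- import ipaddress
--
-- def is_special_range(ip: str, prefix: int) -> bool:
--     """Check if IP/prefix combination is in a special IPv4 range."""
--     try:
--         network = ipaddress.IPv4Network(f"{ip}/{prefix}", strict=False)
--         # network_addr = str(network.network_address)
--
--         # RFC 3330 - Special Use IPv4 Addresses
--         special_ranges = [
--             ("0.0.0.0", 8),  # This network
--             ("127.0.0.0", 8),  # Loopback
--             ("169.254.0.0", 16),  # Link-local
--             ("224.0.0.0", 4),  # Multicast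
--             ("240.0.0.0", 4),  # Reserved
--             ("255.255.255.255", 32),  # Broadcast
--         ]
--
--         for special_ip, special_prefix in special_ranges:
--             special_network = ipaddress.IPv4Network(
--                 f"{special_ip}/{special_prefix}", strict=False
--             )
--             if network.subnet_of(special_network):
--                 return True
--
--         return False
--     except Exception:
--         return False
-- ===== SOURCE B (Python) =====
-- def _parse_ipv4(ip):
--     """Dotted-quad parser matching ipaddress's rules: exactly four octets,
--     decimal ASCII digits only, at most 3 chars, no leading zero, <= 255.
--     Returns the 32-bit integer address, or None if invalid."""
--     parts = ip.split(".")
--     if len(parts) != 4: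
--         return None
--     n = 0
--     for part in parts:
--         if not part or not part.isascii() or not part.isdigit():
--             return None
--         if len(part) > 3 or (part[0] == "0" and len(part) != 1):
--             return None
--         v = int(part)
--         if v > 255:
--             return None
--         n = n * 256 + v
--     return n
--
--
-- def is_special_range(ip: str, prefix: int) -> bool:
--     """Check if IP/prefix combination is in a special IPv4 range."""
--     a = _parse_ipv4(ip)
--     if a is None or not 0 <= prefix <= 32:
--         return False
--     n = a & ~((1 << (32 - prefix)) - 1)  # network address (host bits masked)
--     o1 = n >> 24
--     # 0.0.0.0/8 and 127.0.0.0/8; 169.254.0.0/16; 224.0.0.0/3 (multicast +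
--     # reserved, which already contains 255.255.255.255/32).
--     return ((prefix >= 8 and o1 in (0, 127))
--             or (prefix >= 16 and (n >> 16) == 43518)
--             or (prefix >= 4 and o1 >= 224))
-- ===== Notes on version B (the rewrite author's own statement) =====
-- stated objective: simpler
-- what changed: B drops the ipaddress dependency (a plain dotted-quad parser with the same validation rules) and replaces A's loop constructing six special IPv4Networks with a subnet_of test each by a single closed-form classification of the masked network address: first octet 0 or 127 with prefix>=8, 169.254.* with prefix>=16, first octet >=224 with prefix>=4 (which subsumes the broadcast /32 entry).
import Mathlib
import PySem

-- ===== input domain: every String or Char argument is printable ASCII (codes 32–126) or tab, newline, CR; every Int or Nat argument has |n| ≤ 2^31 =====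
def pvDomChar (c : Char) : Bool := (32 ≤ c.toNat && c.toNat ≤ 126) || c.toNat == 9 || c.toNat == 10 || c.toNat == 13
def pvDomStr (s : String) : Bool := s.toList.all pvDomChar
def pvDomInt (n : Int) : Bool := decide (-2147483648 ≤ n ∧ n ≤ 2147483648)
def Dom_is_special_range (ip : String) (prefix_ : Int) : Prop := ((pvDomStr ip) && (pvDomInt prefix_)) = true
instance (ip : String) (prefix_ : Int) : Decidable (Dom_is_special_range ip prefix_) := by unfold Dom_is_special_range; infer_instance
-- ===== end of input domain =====

-- B replaces A's loop over six special networks (subnet_of each) by one closed-form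
-- classification of the masked network address; same return value, no speed claim.
-- Both ports share pvParseIPv4 (A parses via ipaddress, B hand-parses with the
-- same rules; exact on the printable-ASCII domain): where parsing or the prefix
-- check fails, it yields none/false and both Pythons return False.

-- ===== PORT A =====
-- hand port of ipaddress._parse_octet (3.11): nonempty, ASCII digits only,
-- at most 3 chars, no leading zero, value <= 255
def pvParseOctet (cs : List Char) : Option Int :=
  if cs.isEmpty then none
  else if !(cs.all PySem.Chars.isdigit) then none
  else if 3 < cs.length then none
  else if cs.headD '0' == '0' && cs.length != 1 then none
  else
    let v : Int := cs.foldl (fun acc c => acc * 10 + ((c.toNat : Int) - 48)) 0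
    if 255 < v then none else some v

-- hand port of ipaddress._ip_int_from_string: exactly 4 dot-separated octets
def pvParseIPv4 (ip : String) : Option Int :=
  match PySem.Chars.splitOn ip.toList ['.'] with
  | [c1, c2, c3, c4] =>
    match pvParseOctet c1, pvParseOctet c2, pvParseOctet c3, pvParseOctet c4 with
    | some o1, some o2, some o3, some o4 =>
        some (((o1 * 256 + o2) * 256 + o3) * 256 + o4)
    | _, _, _, _ => none
  | _ => none

def pvSpecialRanges : List (String × Int) :=
  [("0.0.0.0", 8), ("127.0.0.0", 8), ("169.254.0.0", 16),
   ("224.0.0.0", 4), ("240.0.0.0", 4), ("255.255.255.255", 32)]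

def is_special_range (ip : String) (prefix_ : Int) : Bool :=
  match pvParseIPv4 ip with
  | none => false                        -- IPv4Network raises -> except -> False
  | some a =>
    if prefix_ < 0 || 32 < prefix_ then false   -- invalid prefix -> except -> False
    else
      -- strict=False: network_address = address with host bits masked off
      let block : Int := 2 ^ (32 - prefix_).toNat
      let net : Int := a - a % block
      let bcast : Int := net + block - 1
      -- the for-loop with early return True
      pvSpecialRanges.any (fun sr =>
        match pvParseIPv4 sr.1 with
        | none => false
        | some s =>
          let sblock : Int := 2 ^ (32 - sr.2).toNat
          let snet : Int := s - s % sblock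
          -- network.subnet_of(special_network)
          decide (snet ≤ net) && decide (bcast ≤ snet + sblock - 1))

-- ===== PORT B =====
def is_special_range_alt (ip : String) (prefix_ : Int) : Bool :=
  match pvParseIPv4 ip with
  | none => false
  | some a =>
    if prefix_ < 0 || 32 < prefix_ then false
    else
      let n : Int := a - a % 2 ^ (32 - prefix_).toNat  -- a & ~((1 << (32-prefix)) - 1), a ≥ 0
      let o1 : Int := n / 16777216                     -- n >> 24 (n is nonnegative)
      (decide (8 ≤ prefix_) && (o1 == 0 || o1 == 127)) ||
      (decide (16 ≤ prefix_) && n / 65536 == 43518) ||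
      (decide (4 ≤ prefix_) && decide (224 ≤ o1))

-- ===== PRECONDITION & SPEC =====
def Spec_is_special_range (ip : String) (prefix_ : Int) (out : Bool) : Prop := out = is_special_range_alt ip prefix_
instance (ip : String) (prefix_ : Int) (out : Bool) : Decidable (Spec_is_special_range ip prefix_ out) := by unfold Spec_is_special_range; infer_instance

-- ===== CLAIM (what is proved, stated in full; the proofs are below) =====
def Claim_equal_is_special_range : Prop := ∀ (ip : String) (prefix_ : Int), Dom_is_special_range ip prefix_ → Spec_is_special_range ip prefix_ (is_special_range ip prefix_)

-- ===== LEMMAS AND PROOFS =====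
lemma pvDigit_ge (c : Char) (h : PySem.Chars.isdigit c = true) : 48 ≤ (c.toNat : Int) := by
  simp only [PySem.Chars.isdigit, Bool.and_eq_true, decide_eq_true_eq] at h
  have h1 := h.1
  rw [Char.le_def, UInt32.le_iff_toNat_le] at h1
  have h2 : c.toNat = c.val.toNat := rfl
  have h0 : ('0').val.toNat = 48 := rfl
  omega

lemma pvFold_nonneg (cs : List Char) (acc : Int)
    (h : cs.all PySem.Chars.isdigit = true) (ha : 0 ≤ acc) :
    0 ≤ cs.foldl (fun acc c => acc * 10 + ((c.toNat : Int) - 48)) acc := by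
  induction cs generalizing acc with
  | nil => simpa using ha
  | cons c cs ih =>
    simp only [List.all_cons, Bool.and_eq_true] at h
    have := pvDigit_ge c h.1
    exact ih _ h.2 (by show (0:Int) ≤ acc * 10 + ((c.toNat : Int) - 48); omega)

lemma pvParseOctet_bound (cs : List Char) (v : Int) (h : pvParseOctet cs = some v) :
    0 ≤ v ∧ v ≤ 255 := by
  unfold pvParseOctet at h
  split_ifs at h with h1 h2 h3 h4
  simp only [] at h
  split at h
  · cases h
  · next h5 =>
    simp only [Option.some.injEq] at h
    refine ⟨?_, by omega⟩
    rw [← h]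
    exact pvFold_nonneg cs 0 (by simpa using h2) le_rfl

lemma pvParseIPv4_bound (ip : String) (a : Int) (h : pvParseIPv4 ip = some a) :
    0 ≤ a ∧ a < 4294967296 := by
  unfold pvParseIPv4 at h
  split at h
  · split at h
    · next o1 o2 o3 o4 h1 h2 h3 h4 =>
      obtain ⟨b1, b1'⟩ := pvParseOctet_bound _ _ h1
      obtain ⟨b2, b2'⟩ := pvParseOctet_bound _ _ h2
      obtain ⟨b3, b3'⟩ := pvParseOctet_bound _ _ h3
      obtain ⟨b4, b4'⟩ := pvParseOctet_bound _ _ h4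
      simp only [Option.some.injEq] at h
      omega
    · exact absurd h (by simp)
  · exact absurd h (by simp)

lemma pv_core (a p : Int) (ha : 0 ≤ a) (ha2 : a < 4294967296)
    (hp : 0 ≤ p) (hp2 : p ≤ 32) :
    (pvSpecialRanges.any (fun sr =>
        match pvParseIPv4 sr.1 with
        | none => false
        | some s =>
          let sblock : Int := 2 ^ (32 - sr.2).toNat
          let snet : Int := s - s % sblock
          decide (snet ≤ a - a % 2 ^ (32 - p).toNat) &&
          decide (a - a % 2 ^ (32 - p).toNat + 2 ^ (32 - p).toNat - 1 ≤ snet + sblock - 1))) =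
    ((decide (8 ≤ p) && ((a - a % 2 ^ (32 - p).toNat) / 16777216 == 0 ||
        (a - a % 2 ^ (32 - p).toNat) / 16777216 == 127)) ||
     (decide (16 ≤ p) && (a - a % 2 ^ (32 - p).toNat) / 65536 == 43518) ||
     (decide (4 ≤ p) && decide (224 ≤ (a - a % 2 ^ (32 - p).toNat) / 16777216))) := by
  have e0 : pvParseIPv4 "0.0.0.0" = some 0 := by decide
  have e1 : pvParseIPv4 "127.0.0.0" = some 2130706432 := by decide
  have e2 : pvParseIPv4 "169.254.0.0" = some 2851995648 := by decide
  have e3 : pvParseIPv4 "224.0.0.0" = some 3758096384 := by decide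
  have e4 : pvParseIPv4 "240.0.0.0" = some 4026531840 := by decide
  have e5 : pvParseIPv4 "255.255.255.255" = some 4294967295 := by decide
  simp only [pvSpecialRanges, List.any_cons, List.any_nil, e0, e1, e2, e3, e4, e5]
  rw [Bool.eq_iff_iff]
  simp only [Bool.or_eq_true, Bool.and_eq_true, decide_eq_true_eq, beq_iff_eq]
  interval_cases p <;> (norm_num [Int.toNat]; omega)

-- ===== VERDICT (by name: the statement is the Claim_ definition above) =====
theorem is_special_range_spec : Claim_equal_is_special_range := by
  intro ip prefix_ _
  unfold Spec_is_special_range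
  cases h : pvParseIPv4 ip with
  | none => simp [is_special_range, is_special_range_alt, h]
  | some a =>
    obtain ⟨ha, ha2⟩ := pvParseIPv4_bound ip a h
    by_cases hv : prefix_ < 0 || 32 < prefix_
    · simp [is_special_range, is_special_range_alt, h, hv]
    · simp only [Bool.or_eq_true, decide_eq_true_eq, not_or, not_lt] at hv
      simp only [is_special_range, is_special_range_alt, h]
      rw [if_neg (by simp; omega), if_neg (by simp; omega)]
      exact pv_core a prefix_ ha ha2 hv.1 hv.2
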